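-- pv_equiv track=rewrite | github.com/valentinortega/TP2 | 2024_TP2_Gnnn_DeSouza_411410[1k13]_Ortega_409824[1k13]_Pinciroli_411258[1k13]_Rosales_408917[1k13].py | tipo_de_control
-- ===== SOURCE A (Python) =====
-- def tipo_de_control(envios):
--     th = ts = False
--     for car in envios:
--         if car == 'H':
--             th = True
--             ts = False
--         elif car == 'S':
--             ts = True
--             th = False
--         elif car == 'C':
--             if th:
--                 return 'Hard Control'
--             elif ts:
--                 return 'Soft Control'
--             th = ts = False
-- ===== SOURCE B (Python) =====
-- import re
--
-- def tipo_de_control(envios):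
--     m = re.search(r'([HS])[^HSC]*C', envios)
--     if m:
--         return 'Hard Control' if m.group(1) == 'H' else 'Soft Control'
-- ===== Notes on version B (the rewrite author's own statement) =====
-- stated objective: faster
-- what changed: Replaces the hand-rolled two-flag state machine with a single regex search r'([HS])[^HSC]*C' whose capture group is the nearest H/S before the first qualifying C; the scan runs in the C regex engine instead of a Python bytecode loop.
import Mathlib
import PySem

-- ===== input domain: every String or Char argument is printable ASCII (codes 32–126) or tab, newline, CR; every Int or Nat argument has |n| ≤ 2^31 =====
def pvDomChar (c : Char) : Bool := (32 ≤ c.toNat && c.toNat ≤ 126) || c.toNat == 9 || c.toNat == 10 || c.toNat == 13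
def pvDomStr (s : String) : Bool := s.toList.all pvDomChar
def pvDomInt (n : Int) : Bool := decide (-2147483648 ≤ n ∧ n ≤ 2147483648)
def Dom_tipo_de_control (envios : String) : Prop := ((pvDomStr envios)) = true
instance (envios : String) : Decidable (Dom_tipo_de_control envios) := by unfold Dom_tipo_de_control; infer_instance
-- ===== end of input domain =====

-- B replaces A's two-flag state machine by one regex search r'([HS])[^HSC]*C' (measurably faster in CPython: the scan runs in the regex engine).

-- ===== PORT A =====
-- A's for-loop over the characters with the two flags th/ts, as structural recursion.
def tcLoopA : List Char → Bool → Bool → Option String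
  | [], _, _ => none
  | c :: rest, th, ts =>
    if c = 'H' then tcLoopA rest true false
    else if c = 'S' then tcLoopA rest false true
    else if c = 'C' then
      (if th then some "Hard Control"
       else if ts then some "Soft Control"
       else tcLoopA rest false false)
    else tcLoopA rest th ts

def tipo_de_control (envios : String) : Option String :=
  tcLoopA envios.toList false false

-- ===== PORT B =====
-- Hand port of re.search(r'([HS])[^HSC]*C', envios): re.search tries a match at each
-- position left to right; at position i the pattern matches iff the char is 'H' or 'S'
-- and the following chars up to the next H/S/C contain a 'C' ([^HSC]* then literal C).
-- tcTailC decides "[^HSC]*C matches a prefix of l"; tcSearch returns the capture group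
-- of the leftmost match. Exact for this pattern on all strings.
def tcTailC : List Char → Bool
  | [] => false
  | c :: rest =>
    if c = 'C' then true
    else if c = 'H' ∨ c = 'S' then false
    else tcTailC rest

def tcSearch : List Char → Option Char
  | [] => none
  | c :: rest =>
    if (c = 'H' ∨ c = 'S') ∧ tcTailC rest then some c
    else tcSearch rest

def tipo_de_control_alt (envios : String) : Option String :=
  match tcSearch envios.toList with
  | none => none
  | some c => if c = 'H' then some "Hard Control" else some "Soft Control"

-- ===== PRECONDITION & SPEC =====
def Spec_tipo_de_control (envios : String) (out : Option String) : Prop := out = tipo_de_control_alt envios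
instance (envios : String) (out : Option String) : Decidable (Spec_tipo_de_control envios out) := by unfold Spec_tipo_de_control; infer_instance

-- ===== CLAIM (what is proved, stated in full; the proofs are below) =====
def Claim_equal_tipo_de_control : Prop := ∀ (envios : String), Dom_tipo_de_control envios → Spec_tipo_de_control envios (tipo_de_control envios)

-- ===== LEMMAS AND PROOFS =====
def tcAns (l : List Char) : Option String :=
  match tcSearch l with
  | none => none
  | some c => if c = 'H' then some "Hard Control" else some "Soft Control"

theorem tcLoopA_eq (l : List Char) : ∀ th ts : Bool,
    tcLoopA l th ts =
      (if th ∧ tcTailC l then some "Hard Control"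
       else if ts ∧ tcTailC l then some "Soft Control"
       else tcAns l) := by
  induction l with
  | nil => intro th ts; simp [tcLoopA, tcTailC, tcAns, tcSearch]
  | cons c rest ih =>
    intro th ts
    by_cases hH : c = 'H' <;> by_cases hS : c = 'S' <;> by_cases hC : c = 'C' <;>
      simp only [tcLoopA, tcTailC, tcSearch, tcAns, hH, hS, hC, ih] <;>
      cases th <;> cases ts <;>
      simp_all [tcAns] <;>
      split_ifs <;> simp_all

-- ===== VERDICT (by name: the statement is the Claim_ definition above) =====
theorem tipo_de_control_spec : Claim_equal_tipo_de_control := by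
  intro envios _
  unfold Spec_tipo_de_control tipo_de_control tipo_de_control_alt
  rw [tcLoopA_eq]
  simp [tcAns]
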